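-- pv_equiv track=rewrite | github.com/agoliveira/inav_bb_analyzer | inav_vtol_configurator.py | detect_motor_roles
-- ===== SOURCE A (Python) =====
-- def detect_motor_roles(parsed, mc_profile, fw_profile):
--     """Infer motor roles from mixer profile cross-reference."""
--     mc_motors = set()
--     fw_motors = set()
--
--     if mc_profile:
--         for m in parsed["mmix_by_profile"].get(mc_profile, []):
--             if m["throttle"] > 0:
--                 mc_motors.add(m["index"] + 1)  # 1-based
--
--     if fw_profile:
--         for m in parsed["mmix_by_profile"].get(fw_profile, []):
--             if m["throttle"] > 0:
--                 fw_motors.add(m["index"] + 1)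
--
--     tilt_motors = mc_motors & fw_motors  # in both = tilt
--     lift_only = mc_motors - fw_motors     # MC only = lift
--     push_only = fw_motors - mc_motors     # FW only = pusher
--
--     return {
--         "mc_motors": mc_motors,
--         "fw_motors": fw_motors,
--         "tilt_motors": tilt_motors,
--         "lift_only": lift_only,
--         "push_only": push_only,
--     }
-- ===== SOURCE B (Python) =====
-- def detect_motor_roles(parsed, mc_profile, fw_profile):
--     """Infer motor roles via one combined flag dict instead of set algebra."""
--     flags = {}  # 1-based motor index -> [seen_in_mc, seen_in_fw]
--     if mc_profile:
--         for m in parsed["mmix_by_profile"].get(mc_profile, []):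
--             if m["throttle"] > 0:
--                 flags[m["index"] + 1] = [True, False]
--
--     fw_motors = []  # fw motors in first-seen order of the fw pass
--     if fw_profile:
--         for m in parsed["mmix_by_profile"].get(fw_profile, []):
--             if m["throttle"] > 0:
--                 i = m["index"] + 1
--                 e = flags.setdefault(i, [False, False])
--                 if not e[1]:
--                     fw_motors.append(i)
--                 e[1] = True
--
--     mc_motors, tilt, lift, push = [], [], [], []
--     for i, (mc, fw) in flags.items():
--         if mc:
--             mc_motors.append(i)
--         if mc and fw:
--             tilt.append(i)
--         elif mc:
--             lift.append(i)
--         else: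
--             push.append(i)
--
--     return {
--         "mc_motors": set(mc_motors),
--         "fw_motors": set(fw_motors),
--         "tilt_motors": set(tilt),
--         "lift_only": set(lift),
--         "push_only": set(push),
--     }
-- ===== Notes on version B (the rewrite author's own statement) =====
-- stated objective: alternative
-- what changed: Replaces the two index sets combined by set intersection/difference with one dict mapping each motor index to an (in_mc, in_fw) flag pair, filled by the two profile passes and partitioned into the five roles in a single pass over its items.
import Mathlib
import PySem

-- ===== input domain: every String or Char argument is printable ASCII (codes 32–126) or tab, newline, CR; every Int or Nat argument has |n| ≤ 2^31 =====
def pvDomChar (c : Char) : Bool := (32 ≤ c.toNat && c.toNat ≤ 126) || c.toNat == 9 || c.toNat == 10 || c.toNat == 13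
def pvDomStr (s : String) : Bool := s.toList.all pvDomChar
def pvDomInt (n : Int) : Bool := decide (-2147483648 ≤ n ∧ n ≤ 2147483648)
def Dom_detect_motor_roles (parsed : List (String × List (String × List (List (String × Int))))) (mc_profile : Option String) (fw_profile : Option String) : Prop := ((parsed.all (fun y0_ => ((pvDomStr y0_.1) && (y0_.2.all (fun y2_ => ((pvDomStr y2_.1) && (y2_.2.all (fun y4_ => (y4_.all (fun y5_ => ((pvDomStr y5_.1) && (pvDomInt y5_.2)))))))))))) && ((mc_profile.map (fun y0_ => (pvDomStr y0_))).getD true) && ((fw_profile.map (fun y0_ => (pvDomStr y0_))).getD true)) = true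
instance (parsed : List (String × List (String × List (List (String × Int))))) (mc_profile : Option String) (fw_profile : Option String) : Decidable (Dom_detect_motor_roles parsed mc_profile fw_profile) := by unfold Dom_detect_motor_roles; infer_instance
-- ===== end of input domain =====

-- B replaces A's two sets combined by set intersection/difference with one flag dict
-- (motor index ↦ (in_mc, in_fw)) partitioned in a single pass; objective: alternative
-- (same asymptotic cost, genuinely different bookkeeping).

-- ===== PORT A =====
-- shared accessors for identical Python expressions in A and B:
-- `if profile:` + `parsed["mmix_by_profile"].get(profile, [])` (the list the guarded
-- loop iterates; empty when the profile is falsy), `m["throttle"]`, `m["index"]`.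
-- KeyError cases (missing "mmix_by_profile"/"throttle"/"index") are excluded by
-- Pre_detect_motor_roles, so the `getD` defaults are never observed.
def pvTruthy (o : Option String) : Bool :=
  match o with
  | some s => s ≠ ""
  | none => false

def pvThr (m : List (String × Int)) : Int := (PySem.Dict.mk m).getD "throttle" 0

def pvIdx (m : List (String × Int)) : Int := (PySem.Dict.mk m).getD "index" 0

def pvProfList (parsed : List (String × List (String × List (List (String × Int)))))
    (o : Option String) : List (List (String × Int)) :=
  if pvTruthy o then
    (PySem.Dict.mk (((PySem.Dict.mk parsed).get? "mmix_by_profile").getD [])).getD (o.getD "") []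
  else []

def detect_motor_roles (parsed : List (String × List (String × List (List (String × Int))))) (mc_profile : Option String) (fw_profile : Option String) : List (String × List Int) :=
  let mc_motors : PySem.Set Int :=
    (pvProfList parsed mc_profile).foldl
      (fun s m => if pvThr m > 0 then PySem.Set.add s (pvIdx m + 1) else s) PySem.Set.empty
  let fw_motors : PySem.Set Int :=
    (pvProfList parsed fw_profile).foldl
      (fun s m => if pvThr m > 0 then PySem.Set.add s (pvIdx m + 1) else s) PySem.Set.empty
  let tilt_motors := PySem.Set.inter mc_motors fw_motors
  let lift_only := PySem.Set.diff mc_motors fw_motors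
  let push_only := PySem.Set.diff fw_motors mc_motors
  [("mc_motors", mc_motors), ("fw_motors", fw_motors), ("tilt_motors", tilt_motors),
   ("lift_only", lift_only), ("push_only", push_only)]

-- ===== PORT B =====
def detect_motor_roles_alt (parsed : List (String × List (String × List (List (String × Int))))) (mc_profile : Option String) (fw_profile : Option String) : List (String × List Int) :=
  let flags0 : PySem.Dict Int (Bool × Bool) :=
    (pvProfList parsed mc_profile).foldl
      (fun d m => if pvThr m > 0 then d.insert (pvIdx m + 1) (true, false) else d)
      PySem.Dict.empty
  let st : PySem.Dict Int (Bool × Bool) × List Int :=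
    (pvProfList parsed fw_profile).foldl
      (fun st m =>
        if pvThr m > 0 then
          let e := st.1.getD (pvIdx m + 1) (false, false)
          (st.1.insert (pvIdx m + 1) (e.1, true),
           if e.2 then st.2 else st.2 ++ [pvIdx m + 1])
        else st)
      (flags0, ([] : List Int))
  let part : List Int × List Int × List Int × List Int :=
    st.1.items.foldl
      (fun acc p =>
        (if p.2.1 then acc.1 ++ [p.1] else acc.1,
         if p.2.1 && p.2.2 then acc.2.1 ++ [p.1] else acc.2.1,
         if p.2.1 && !p.2.2 then acc.2.2.1 ++ [p.1] else acc.2.2.1,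
         if !p.2.1 then acc.2.2.2 ++ [p.1] else acc.2.2.2))
      ([], [], [], [])
  [("mc_motors", PySem.Set.ofList part.1), ("fw_motors", PySem.Set.ofList st.2),
   ("tilt_motors", PySem.Set.ofList part.2.1), ("lift_only", PySem.Set.ofList part.2.2.1),
   ("push_only", PySem.Set.ofList part.2.2.2)]

-- ===== PRECONDITION & SPEC =====
-- Pre_ excludes exactly the inputs on which the Python A raises KeyError: a truthy
-- profile while "mmix_by_profile" is absent, or an iterated motor dict without a
-- "throttle" key (or without an "index" key when its throttle is positive).
def Pre_detect_motor_roles (parsed : List (String × List (String × List (List (String × Int))))) (mc_profile : Option String) (fw_profile : Option String) : Prop :=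
  ((pvTruthy mc_profile = true ∨ pvTruthy fw_profile = true) →
      "mmix_by_profile" ∈ parsed.map Prod.fst) ∧
  (∀ m ∈ pvProfList parsed mc_profile,
      "throttle" ∈ m.map Prod.fst ∧ (pvThr m > 0 → "index" ∈ m.map Prod.fst)) ∧
  (∀ m ∈ pvProfList parsed fw_profile,
      "throttle" ∈ m.map Prod.fst ∧ (pvThr m > 0 → "index" ∈ m.map Prod.fst))
instance (parsed : List (String × List (String × List (List (String × Int))))) (mc_profile : Option String) (fw_profile : Option String) : Decidable (Pre_detect_motor_roles parsed mc_profile fw_profile) := by unfold Pre_detect_motor_roles; infer_instance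

def pvWitness_detect_motor_roles : (List (String × List (String × List (List (String × Int))))) × Option String × Option String :=
  ([("mmix_by_profile", [("a", [[("throttle", 1), ("index", 0)]])])], some "a", none)

def Spec_detect_motor_roles (parsed : List (String × List (String × List (List (String × Int))))) (mc_profile : Option String) (fw_profile : Option String) (out : List (String × List Int)) : Prop := out = detect_motor_roles_alt parsed mc_profile fw_profile
instance (parsed : List (String × List (String × List (List (String × Int))))) (mc_profile : Option String) (fw_profile : Option String) (out : List (String × List Int)) : Decidable (Spec_detect_motor_roles parsed mc_profile fw_profile out) := by unfold Spec_detect_motor_roles; infer_instance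

-- ===== CLAIM (what is proved, stated in full; the proofs are below) =====
def Claim_equal_detect_motor_roles : Prop := ∀ (parsed : List (String × List (String × List (List (String × Int))))) (mc_profile : Option String) (fw_profile : Option String), Dom_detect_motor_roles parsed mc_profile fw_profile → Pre_detect_motor_roles parsed mc_profile fw_profile → Spec_detect_motor_roles parsed mc_profile fw_profile (detect_motor_roles parsed mc_profile fw_profile)

-- ===== LEMMAS AND PROOFS =====

-- candidate motor indices (1-based, positive throttle) that both loops act on
def pvCand (ms : List (List (String × Int))) : List Int :=
  ms.filterMap (fun m => if pvThr m > 0 then some (pvIdx m + 1) else none)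

theorem pv_foldl_extract {β : Type} (f : β → Int → β) (ms : List (List (String × Int)))
    (init : β) :
    ms.foldl (fun st m => if pvThr m > 0 then f st (pvIdx m + 1) else st) init
      = (pvCand ms).foldl f init := by
  induction ms generalizing init with
  | nil => rfl
  | cons m ms ih =>
    by_cases h : pvThr m > 0 <;> simp [pvCand, h, ih, List.foldl_cons]

-- the fold of A's guarded set-insertion loop, beta-reduced forms for the four loops
theorem pv_extract_A (ms : List (List (String × Int))) (init : PySem.Set Int) :
    ms.foldl (fun s m => if pvThr m > 0 then PySem.Set.add s (pvIdx m + 1) else s) init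
      = (pvCand ms).foldl PySem.Set.add init :=
  pv_foldl_extract PySem.Set.add ms init

theorem pv_extract_B1 (ms : List (List (String × Int))) (init : PySem.Dict Int (Bool × Bool)) :
    ms.foldl (fun d m => if pvThr m > 0 then d.insert (pvIdx m + 1) (true, false) else d) init
      = (pvCand ms).foldl (fun d i => d.insert i (true, false)) init :=
  pv_foldl_extract (fun d i => d.insert i (true, false)) ms init

theorem pv_extract_B2 (ms : List (List (String × Int)))
    (init : PySem.Dict Int (Bool × Bool) × List Int) :
    ms.foldl
        (fun st m =>
          if pvThr m > 0 then
            (st.1.insert (pvIdx m + 1) ((st.1.getD (pvIdx m + 1) (false, false)).1, true),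
             if (st.1.getD (pvIdx m + 1) (false, false)).2 then st.2
             else st.2 ++ [pvIdx m + 1])
          else st) init
      = (pvCand ms).foldl
          (fun st i =>
            (st.1.insert i ((st.1.getD i (false, false)).1, true),
             if (st.1.getD i (false, false)).2 then st.2 else st.2 ++ [i])) init :=
  pv_foldl_extract
    (fun st i =>
      (st.1.insert i ((st.1.getD i (false, false)).1, true),
       if (st.1.getD i (false, false)).2 then st.2 else st.2 ++ [i])) ms init

-- the combined flag association list B maintains, as a function of A's two sets
def pvMerge (S T : List Int) : List (Int × (Bool × Bool)) :=
  S.map (fun i => (i, (true, T.contains i))) ++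
    (T.filter (fun i => !S.contains i)).map (fun i => (i, (false, true)))

theorem pv_find_beq (L : List Int) (i : Int) :
    L.find? (fun j => j == i) = if i ∈ L then some i else none := by
  induction L with
  | nil => rfl
  | cons j L ih =>
    by_cases h : j = i
    · simp [h]
    · have h' : ¬ i = j := fun hh => h hh.symm
      simp [h, h', ih]

theorem pv_contains_int (T : List Int) (i : Int) : T.contains i = decide (i ∈ T) := by
  by_cases h : i ∈ T <;> simp [h]

theorem pv_any_beq (L : List Int) (i : Int) : (L.any fun j => j == i) = decide (i ∈ L) := by
  by_cases h : i ∈ L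
  · simp only [h, decide_true, List.any_eq_true]
    exact ⟨i, h, by simp⟩
  · simp only [h, decide_false, List.any_eq_false]
    intro j hj
    simp only [beq_iff_eq]
    exact fun hh => h (hh ▸ hj)

theorem pv_getD_merge (S T : List Int) (i : Int) :
    (PySem.Dict.mk (pvMerge S T)).getD i (false, false)
      = if i ∈ S then (true, T.contains i)
        else if i ∈ T then (false, true) else (false, false) := by
  simp only [PySem.Dict.getD, PySem.Dict.get?, pvMerge,
    List.find?_append, List.find?_map, Function.comp_def, pv_find_beq]
  by_cases hS : i ∈ S
  · simp [hS]
  · by_cases hT : i ∈ T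
    · simp [hS, hT]
    · simp [hS, hT]

theorem pv_contains_merge (S T : List Int) (i : Int) :
    (PySem.Dict.mk (pvMerge S T)).contains i = (decide (i ∈ S) || decide (i ∈ T)) := by
  simp only [PySem.Dict.contains, pvMerge, List.any_append, List.any_map,
    Function.comp_def, pv_any_beq]
  by_cases hS : i ∈ S
  · simp [hS]
  · by_cases hT : i ∈ T
    · simp [hS, hT, List.mem_filter]
    · simp only [hS, hT, decide_false, Bool.false_or, Bool.or_false]
      simp [List.mem_filter, hT]

theorem pv_insert_merge (S T : List Int) (i : Int) :
    (PySem.Dict.mk (pvMerge S T)).insert i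
        (((PySem.Dict.mk (pvMerge S T)).getD i (false, false)).1, true)
      = PySem.Dict.mk (pvMerge S (PySem.Set.add T i)) := by
  rw [pv_getD_merge]
  by_cases hS : i ∈ S
  · have hc : (PySem.Dict.mk (pvMerge S T)).contains i = true := by
      rw [pv_contains_merge]; simp [hS]
    simp only [PySem.Dict.insert, hc, if_pos hS, if_true]
    congr 1
    simp only [pvMerge, List.map_append, List.map_map, Function.comp_def]
    congr 1
    · apply List.map_congr_left
      intro j hj
      by_cases hji : j = i
      · subst hji
        simp [PySem.Set.mem_add]
      · simp [hji, PySem.Set.mem_add]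
    · rw [show (PySem.Set.add T i).filter (fun j => !S.contains j)
            = T.filter (fun j => !S.contains j) from ?_]
      · apply List.map_congr_left
        intro j hj
        have hjS : ¬ j ∈ S := by
          simp only [List.mem_filter] at hj
          simpa [pv_contains_int] using hj.2
        have hji : ¬ (j = i) := fun hh => hjS (hh ▸ hS)
        simp [hji]
      · rw [PySem.Set.add_eq_ite]
        by_cases hT : i ∈ T
        · simp [hT]
        · simp [hT, List.filter_append, hS]
  · by_cases hT : i ∈ T
    · have hc : (PySem.Dict.mk (pvMerge S T)).contains i = true := by
        rw [pv_contains_merge]; simp [hT]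
      simp only [PySem.Dict.insert, hc, if_neg hS, if_pos hT, if_true]
      congr 1
      rw [PySem.Set.add_eq_ite, if_pos hT]
      simp only [pvMerge, List.map_append, List.map_map, Function.comp_def]
      congr 1
      · apply List.map_congr_left
        intro j hj
        have hji : ¬ (j = i) := fun hh => hS (hh ▸ hj)
        simp [hji]
      · apply List.map_congr_left
        intro j hj
        by_cases hji : j = i <;> simp [hji]
    · have hc : (PySem.Dict.mk (pvMerge S T)).contains i = false := by
        rw [pv_contains_merge]; simp [hS, hT]
      simp only [PySem.Dict.insert, hc, Bool.false_eq_true, if_false, if_neg hS, if_neg hT]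
      congr 1
      rw [PySem.Set.add_eq_ite, if_neg hT]
      simp only [pvMerge]
      rw [List.filter_append]
      have h1 : List.filter (fun j => !S.contains j) [i] = [i] := by
        simp [hS]
      rw [h1]
      simp only [List.map_append, List.append_assoc]
      congr 1
      apply List.map_congr_left
      intro j hj
      have hji : ¬ (j = i) := fun hh => hS (hh ▸ hj)
      have h2 : (T ++ [i]).contains j = T.contains j := by
        simp [hji]
      rw [h2]

theorem pv_step (S T : List Int) (i : Int) :
    ((PySem.Dict.mk (pvMerge S T)).insert i
        (((PySem.Dict.mk (pvMerge S T)).getD i (false, false)).1, true),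
      if ((PySem.Dict.mk (pvMerge S T)).getD i (false, false)).2 then T else T ++ [i])
      = (PySem.Dict.mk (pvMerge S (PySem.Set.add T i)), PySem.Set.add T i) := by
  rw [pv_insert_merge]
  congr 1
  rw [pv_getD_merge, PySem.Set.add_eq_ite]
  by_cases hS : i ∈ S
  · by_cases hT : i ∈ T <;> simp [hS, hT]
  · by_cases hT : i ∈ T <;> simp [hS, hT]

theorem pv_loop1 (as : List Int) (S : List Int) :
    as.foldl (fun d i => d.insert i (true, false))
        (PySem.Dict.mk (S.map (fun i => (i, (true, false)))))
      = PySem.Dict.mk ((as.foldl PySem.Set.add S).map (fun i => (i, (true, false)))) := by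
  induction as generalizing S with
  | nil => rfl
  | cons i as ih =>
    simp only [List.foldl_cons]
    have hstep : (PySem.Dict.mk (S.map (fun i => (i, (true, false))))).insert i (true, false)
        = PySem.Dict.mk ((PySem.Set.add S i).map (fun i => (i, (true, false)))) := by
      have hc : (PySem.Dict.mk (S.map (fun i => (i, (true, false))))).contains i
          = decide (i ∈ S) := by
        simp only [PySem.Dict.contains, List.any_map, Function.comp_def, pv_any_beq]
      by_cases hS : i ∈ S
      · simp only [PySem.Dict.insert, hc, hS, decide_true, if_true]
        rw [PySem.Set.add_eq_ite, if_pos hS]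
        congr 1
        simp only [List.map_map, Function.comp_def]
        apply List.map_congr_left
        intro j hj
        by_cases hji : j = i <;> simp [hji]
      · simp only [PySem.Dict.insert, hc, hS, decide_false, Bool.false_eq_true, if_false]
        rw [PySem.Set.add_eq_ite, if_neg hS]
        congr 1
        simp
    rw [hstep, ih]

theorem pv_merge_nilT (S : List Int) :
    pvMerge S [] = S.map (fun i => (i, (true, false))) := by
  simp [pvMerge]

theorem pv_loop2 (bs S T : List Int) :
    bs.foldl
        (fun st i =>
          (st.1.insert i ((st.1.getD i (false, false)).1, true),
           if (st.1.getD i (false, false)).2 then st.2 else st.2 ++ [i]))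
        (PySem.Dict.mk (pvMerge S T), T)
      = (PySem.Dict.mk (pvMerge S (bs.foldl PySem.Set.add T)), bs.foldl PySem.Set.add T) := by
  induction bs generalizing T with
  | nil => rfl
  | cons i bs ih =>
    simp only [List.foldl_cons]
    rw [show ((PySem.Dict.mk (pvMerge S T)).insert i
        (((PySem.Dict.mk (pvMerge S T)).getD i (false, false)).1, true),
        if ((PySem.Dict.mk (pvMerge S T)).getD i (false, false)).2 then T else T ++ [i])
      = (PySem.Dict.mk (pvMerge S (PySem.Set.add T i)), PySem.Set.add T i) from pv_step S T i]
    exact ih (PySem.Set.add T i)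

theorem pv_part_gen (L : List (Int × (Bool × Bool))) (a b c d : List Int) :
    L.foldl
        (fun acc p =>
          (if p.2.1 then acc.1 ++ [p.1] else acc.1,
           if p.2.1 && p.2.2 then acc.2.1 ++ [p.1] else acc.2.1,
           if p.2.1 && !p.2.2 then acc.2.2.1 ++ [p.1] else acc.2.2.1,
           if !p.2.1 then acc.2.2.2 ++ [p.1] else acc.2.2.2))
        (a, b, c, d)
      = (a ++ (L.filter (fun p => p.2.1)).map (fun p => p.1),
         b ++ (L.filter (fun p => p.2.1 && p.2.2)).map (fun p => p.1),
         c ++ (L.filter (fun p => p.2.1 && !p.2.2)).map (fun p => p.1),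
         d ++ (L.filter (fun p => !p.2.1)).map (fun p => p.1)) := by
  induction L generalizing a b c d with
  | nil => simp
  | cons p L ih =>
    simp only [List.foldl_cons, List.filter_cons]
    rw [ih]
    obtain ⟨i, mcf, fwf⟩ := p
    cases mcf <;> cases fwf <;> simp

theorem pv_sel_mc (S T : List Int) :
    ((pvMerge S T).filter (fun p => p.2.1)).map (fun p => p.1) = S := by
  simp [pvMerge, List.filter_append, List.filter_map, Function.comp_def, List.map_map]

theorem pv_sel_tilt (S T : List Int) :
    ((pvMerge S T).filter (fun p => p.2.1 && p.2.2)).map (fun p => p.1)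
      = S.filter (fun i => T.contains i) := by
  simp [pvMerge, List.filter_append, List.filter_map, Function.comp_def, List.map_map]

theorem pv_sel_lift (S T : List Int) :
    ((pvMerge S T).filter (fun p => p.2.1 && !p.2.2)).map (fun p => p.1)
      = S.filter (fun i => !T.contains i) := by
  simp [pvMerge, List.filter_append, List.filter_map, Function.comp_def, List.map_map]

theorem pv_sel_push (S T : List Int) :
    ((pvMerge S T).filter (fun p => !p.2.1)).map (fun p => p.1)
      = T.filter (fun i => !S.contains i) := by
  simp [pvMerge, List.filter_append, List.filter_map, Function.comp_def, List.map_map]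

-- the two programs, reduced to the shared candidate-index lists of the two profiles
theorem pv_core (as bs : List Int) :
    ([("mc_motors", as.foldl PySem.Set.add PySem.Set.empty),
      ("fw_motors", bs.foldl PySem.Set.add PySem.Set.empty),
      ("tilt_motors", PySem.Set.inter (as.foldl PySem.Set.add PySem.Set.empty) (bs.foldl PySem.Set.add PySem.Set.empty)),
      ("lift_only", PySem.Set.diff (as.foldl PySem.Set.add PySem.Set.empty) (bs.foldl PySem.Set.add PySem.Set.empty)),
      ("push_only", PySem.Set.diff (bs.foldl PySem.Set.add PySem.Set.empty) (as.foldl PySem.Set.add PySem.Set.empty))]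
        : List (String × List Int))
      = (let flags0 : PySem.Dict Int (Bool × Bool) :=
            as.foldl (fun d i => d.insert i (true, false)) PySem.Dict.empty
         let st : PySem.Dict Int (Bool × Bool) × List Int :=
            bs.foldl (fun st i =>
              (st.1.insert i ((st.1.getD i (false, false)).1, true),
               if (st.1.getD i (false, false)).2 then st.2 else st.2 ++ [i]))
              (flags0, ([] : List Int))
         let part : List Int × List Int × List Int × List Int :=
            st.1.items.foldl
              (fun acc p =>
                (if p.2.1 then acc.1 ++ [p.1] else acc.1,
                 if p.2.1 && p.2.2 then acc.2.1 ++ [p.1] else acc.2.1,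
                 if p.2.1 && !p.2.2 then acc.2.2.1 ++ [p.1] else acc.2.2.1,
                 if !p.2.1 then acc.2.2.2 ++ [p.1] else acc.2.2.2))
              ([], [], [], [])
         [("mc_motors", PySem.Set.ofList part.1), ("fw_motors", PySem.Set.ofList st.2),
          ("tilt_motors", PySem.Set.ofList part.2.1), ("lift_only", PySem.Set.ofList part.2.2.1),
          ("push_only", PySem.Set.ofList part.2.2.2)]) := by
  have hS : (PySem.Set.ofList as).Nodup := PySem.Set.nodup_ofList as
  have hT : (PySem.Set.ofList bs).Nodup := PySem.Set.nodup_ofList bs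
  have h0 : (PySem.Dict.empty : PySem.Dict Int (Bool × Bool))
      = PySem.Dict.mk (([] : List Int).map (fun i => (i, (true, false)))) := rfl
  rw [h0, pv_loop1]
  simp only [show (PySem.Set.empty : List Int) = [] from rfl, ← PySem.Set.ofList_eq_foldl]
  rw [← pv_merge_nilT (PySem.Set.ofList as), pv_loop2]
  simp only [← PySem.Set.ofList_eq_foldl, pv_part_gen, List.nil_append,
    pv_sel_mc, pv_sel_tilt, pv_sel_lift, pv_sel_push]
  rw [PySem.Set.ofList_ofList, PySem.Set.ofList_ofList,
    PySem.Set.ofList_eq_self_of_nodup _ (hS.filter _),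
    PySem.Set.ofList_eq_self_of_nodup _ (hS.filter _),
    PySem.Set.ofList_eq_self_of_nodup _ (hT.filter _)]
  rfl

-- ===== VERDICT (by name: the statement is the Claim_ definition above) =====
theorem detect_motor_roles_spec : Claim_equal_detect_motor_roles := by
  intro parsed mc_profile fw_profile _ _
  unfold Spec_detect_motor_roles
  simp only [detect_motor_roles, detect_motor_roles_alt]
  rw [pv_extract_A, pv_extract_A, pv_extract_B1, pv_extract_B2]
  exact pv_core _ _
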